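-- pv_equiv track=rewrite | github.com/suminb99/codingTest-study | 백준/Silver/3085. 사탕 게임/사탕 게임.py | countCandies
-- ===== SOURCE A (Python) =====
-- def countCandies(mc, n, x1, y1, x2, y2):
--     mc = [row[:] for row in mc]
--
--     maxCount = 1
--     mc[x1][y1], mc[x2][y2] = mc[x2][y2], mc[x1][y1]
--
--     # 각 행에서 연속된 사탕의 최대 길이 찾기
--     for i in range(n):
--
--         # 각 행에서 연속된 사탕의 최대 길이 찾기
--         col = 1
--         for j in range(1, n):
--             if mc[i][j] == mc[i][j-1]:  # 연속된 사탕
--                 col += 1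
--             else:
--                 maxCount = max(maxCount, col)
--                 col = 1
--         maxCount = max(maxCount, col)  # 마지막 연속된 부분도 체크
--
--         # 각 행에서 연속된 사탕의 최대 길이 찾기
--         row = 1
--         for j in range(1, n):
--             if mc[j][i] == mc[j-1][i]:  # 연속된 사탕
--                 row += 1
--             else:
--                 maxCount = max(maxCount, row)
--                 row = 1
--         maxCount = max(maxCount, row)  # 마지막 연속된 부분도 체크
--
--     return maxCount
-- ===== SOURCE B (Python) =====
-- def longest_gap(line):
--     """Longest run of equal adjacent values, computed as the largest gap
--     between consecutive change positions (0 for an empty line)."""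
--     cuts = [j for j in range(1, len(line)) if line[j] != line[j - 1]]
--     edges = [0] + cuts + [len(line)]
--     return max(b - a for a, b in zip(edges, edges[1:]))
--
--
-- def countCandies(mc, n, x1, y1, x2, y2):
--     g = [row[:] for row in mc]
--     g[x1][y1], g[x2][y2] = g[x2][y2], g[x1][y1]
--     rows = [g[i][:n] for i in range(n)]
--     lines = rows + [list(c) for c in zip(*rows)]
--     return max([1] + [longest_gap(line) for line in lines])
-- ===== Notes on version B (the rewrite author's own statement) =====
-- stated objective: alternative
-- what changed: Instead of streaming run counters threaded through a shared maxCount, B collects for each line the list of change positions (indices where adjacent values differ) and returns the largest gap between consecutive boundary indices, applied uniformly to the swapped subgrid's rows and their zip-transpose.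
import Mathlib
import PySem

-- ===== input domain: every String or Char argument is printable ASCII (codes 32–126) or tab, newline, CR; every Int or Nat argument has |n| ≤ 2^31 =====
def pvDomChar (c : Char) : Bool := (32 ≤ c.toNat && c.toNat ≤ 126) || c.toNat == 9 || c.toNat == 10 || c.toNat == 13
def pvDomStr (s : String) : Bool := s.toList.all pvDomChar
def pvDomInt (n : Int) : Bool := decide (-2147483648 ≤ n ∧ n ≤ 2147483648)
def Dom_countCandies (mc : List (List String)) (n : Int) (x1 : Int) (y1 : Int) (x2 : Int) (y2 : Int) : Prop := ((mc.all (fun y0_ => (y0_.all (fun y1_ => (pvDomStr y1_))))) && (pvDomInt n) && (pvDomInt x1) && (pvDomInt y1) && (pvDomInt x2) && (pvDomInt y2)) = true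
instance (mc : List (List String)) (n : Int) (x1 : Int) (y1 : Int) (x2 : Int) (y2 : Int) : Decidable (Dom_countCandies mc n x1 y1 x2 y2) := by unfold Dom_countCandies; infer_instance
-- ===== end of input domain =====

-- B replaces A's streaming run counters by a boundary computation: per line it collects the
-- change positions and takes the largest gap between consecutive boundaries (alternative
-- decomposition; return value only — neither port mutates anything, Python A copies the grid).

-- ===== PORT A =====
-- the tuple swap mc[x1][y1], mc[x2][y2] = mc[x2][y2], mc[x1][y1] on the copied grid
-- (both Pythons contain this identical statement, so the helper is shared by the ports)
def pvSwap (mc : List (List String)) (x1 y1 x2 y2 : Int) : List (List String) :=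
  let v2 := PySem.List.pyGetD (PySem.List.pyGetD mc x2 []) y2 ""
  let v1 := PySem.List.pyGetD (PySem.List.pyGetD mc x1 []) y1 ""
  let g1 := PySem.List.pySetD mc x1 (PySem.List.pySetD (PySem.List.pyGetD mc x1 []) y1 v2)
  PySem.List.pySetD g1 x2 (PySem.List.pySetD (PySem.List.pyGetD g1 x2 []) y2 v1)

def countCandies (mc : List (List String)) (n : Int) (x1 : Int) (y1 : Int) (x2 : Int) (y2 : Int) : Int :=
  let g := pvSwap mc x1 y1 x2 y2
  (PySem.List.pyRange 0 n).foldl (fun (m : Int) i =>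
    let rowRes := (PySem.List.pyRange 1 n).foldl (fun (s : Int × Int) j =>
      if PySem.List.pyGetD (PySem.List.pyGetD g i []) j "" ==
         PySem.List.pyGetD (PySem.List.pyGetD g i []) (j - 1) ""
      then (s.1, s.2 + 1) else (max s.1 s.2, 1)) (m, 1)
    let m1 := max rowRes.1 rowRes.2
    let colRes := (PySem.List.pyRange 1 n).foldl (fun (s : Int × Int) j =>
      if PySem.List.pyGetD (PySem.List.pyGetD g j []) i "" ==
         PySem.List.pyGetD (PySem.List.pyGetD g (j - 1) []) i ""
      then (s.1, s.2 + 1) else (max s.1 s.2, 1)) (m1, 1)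
    max colRes.1 colRes.2) 1

-- ===== PORT B =====
-- longest_gap(line): change positions, boundary list, max gap between consecutive boundaries.
-- max(gen) is ported with PySem.List.max?; the .getD 0 default is never used since the
-- boundary list always has at least the two entries 0 and len(line).
def pvGap (l : List String) : Int :=
  let cuts := (PySem.List.pyRange 1 (l.length : Int)).filter
    (fun j => !(PySem.List.pyGetD l j "" == PySem.List.pyGetD l (j - 1) ""))
  let edges := 0 :: cuts ++ [(l.length : Int)]
  ((PySem.List.max? ((edges.zip edges.tail).map (fun p => p.2 - p.1))
      (fun x => x)).getD 0)

-- zip(*rows): truncating transpose, column i = the i-th entry of every row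
def pvZipStar (rows : List (List String)) : List (List String) :=
  match rows with
  | [] => []
  | r :: rs =>
      (List.range (rs.foldl (fun a l => min a l.length) r.length)).map
        (fun i => (r :: rs).map (fun row => row.getD i ""))

def countCandies_alt (mc : List (List String)) (n : Int) (x1 : Int) (y1 : Int) (x2 : Int) (y2 : Int) : Int :=
  let g := pvSwap mc x1 y1 x2 y2
  let rows := (PySem.List.pyRange 0 n).map
    (fun i => PySem.List.slice (PySem.List.pyGetD g i []) none (some n))
  let lines := rows ++ pvZipStar rows
  (lines.map pvGap).foldl max 1

-- ===== PRECONDITION & SPEC =====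
-- Pre_: exactly the inputs where Python A returns normally: the two swapped cells exist
-- (Python index semantics, negative indices allowed), and for n ≥ 2 the scanned n×n block
-- exists (n ≤ number of rows, first n rows of length ≥ n); otherwise A raises IndexError.
def Pre_countCandies (mc : List (List String)) (n : Int) (x1 : Int) (y1 : Int) (x2 : Int) (y2 : Int) : Prop :=
  PySem.Raise.InRange mc.length x1 ∧
  PySem.Raise.InRange (PySem.List.pyGetD mc x1 []).length y1 ∧
  PySem.Raise.InRange mc.length x2 ∧
  PySem.Raise.InRange (PySem.List.pyGetD mc x2 []).length y2 ∧
  (2 ≤ n → n ≤ (mc.length : Int) ∧ ∀ r ∈ mc.take n.toNat, n ≤ (r.length : Int))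
instance (mc : List (List String)) (n : Int) (x1 : Int) (y1 : Int) (x2 : Int) (y2 : Int) : Decidable (Pre_countCandies mc n x1 y1 x2 y2) := by unfold Pre_countCandies; infer_instance

def pvWitness_countCandies : List (List String) × Int × Int × Int × Int × Int :=
  ([["C", "P"], ["P", "C"]], 2, 0, 0, 0, 1)

def Spec_countCandies (mc : List (List String)) (n : Int) (x1 : Int) (y1 : Int) (x2 : Int) (y2 : Int) (out : Int) : Prop := out = countCandies_alt mc n x1 y1 x2 y2
instance (mc : List (List String)) (n : Int) (x1 : Int) (y1 : Int) (x2 : Int) (y2 : Int) (out : Int) : Decidable (Spec_countCandies mc n x1 y1 x2 y2 out) := by unfold Spec_countCandies; infer_instance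

-- ===== CLAIM (what is proved, stated in full; the proofs are below) =====
def Claim_equal_countCandies : Prop := ∀ (mc : List (List String)) (n : Int) (x1 : Int) (y1 : Int) (x2 : Int) (y2 : Int), Dom_countCandies mc n x1 y1 x2 y2 → Pre_countCandies mc n x1 y1 x2 y2 → Spec_countCandies mc n x1 y1 x2 y2 (countCandies mc n x1 y1 x2 y2)

-- ===== LEMMAS AND PROOFS =====

-- reference groupby-style run list and longest run (proof-side reference value)
def pvRuns (l : List String) : List (List String) :=
  match l with
  | [] => []
  | a :: t => (a :: t.takeWhile (· == a)) :: pvRuns (t.dropWhile (· == a))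
termination_by l.length
decreasing_by simpa using Nat.lt_succ_of_le (List.length_dropWhile_le _ _)

def pvLongestRun (l : List String) : Int :=
  ((pvRuns l).map (fun grp => (grp.length : Int))).foldr max 0

-- reference form of A's counter loop, tracking the previous element structurally
def pvFoldPairs (a : String) (t : List String) (s : Int × Int) : Int × Int :=
  match t with
  | [] => s
  | b :: t' => pvFoldPairs b t' (if b == a then (s.1, s.2 + 1) else (max s.1 s.2, 1))

-- reference maximal-run counter
def pvRunMax (a : String) (t : List String) (c : Int) : Int :=
  match t with
  | [] => c
  | b :: t' => if b == a then pvRunMax b t' (c + 1) else max c (pvRunMax b t' 1)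

-- reference form of B's cut-position list, tracking the previous element structurally
def pvCutsRef (a : String) (t : List String) (pos : Int) : List Int :=
  match t with
  | [] => []
  | b :: t' => if b == a then pvCutsRef b t' (pos + 1) else pos :: pvCutsRef b t' (pos + 1)

-- adjacent differences of a boundary list
def pvDiffs (es : List Int) : List Int := (es.zip es.tail).map (fun p => p.2 - p.1)

theorem pvLongestRun_cons (a : String) (t : List String) :
    pvLongestRun (a :: t) =
      max (1 + ((t.takeWhile (· == a)).length : Int)) (pvLongestRun (t.dropWhile (· == a))) := by
  rw [pvLongestRun, pvRuns]
  simp [pvLongestRun]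
  omega

theorem pvRunMax_eq (t : List String) : ∀ (a : String) (c : Int), 1 ≤ c →
    pvRunMax a t c =
      max (c + ((t.takeWhile (· == a)).length : Int)) (pvLongestRun (t.dropWhile (· == a))) := by
  induction t with
  | nil => intro a c hc; simp [pvRunMax, pvLongestRun, pvRuns]; omega
  | cons b t ih =>
    intro a c hc
    rw [pvRunMax]
    by_cases hb : (b == a) = true
    · have hba : b = a := by simpa using hb
      subst hba
      rw [if_pos hb, ih b (c + 1) (by omega)]
      simp
      omega
    · rw [if_neg hb, ih b 1 (by omega),
        List.takeWhile_cons_of_neg (by simpa using hb),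
        List.dropWhile_cons_of_neg (by simpa using hb), pvLongestRun_cons]
      simp only [List.length_nil, Nat.cast_zero, add_zero]

theorem pvRunMax_longestRun (a : String) (t : List String) :
    pvRunMax a t 1 = pvLongestRun (a :: t) := by
  rw [pvRunMax_eq t a 1 (by omega), pvLongestRun_cons]

theorem pvFoldPairs_max (t : List String) : ∀ (a : String) (m c : Int),
    max (pvFoldPairs a t (m, c)).1 (pvFoldPairs a t (m, c)).2 = max m (pvRunMax a t c) := by
  induction t with
  | nil => intro a m c; simp [pvFoldPairs, pvRunMax]
  | cons b t ih =>
    intro a m c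
    rw [pvFoldPairs, pvRunMax]
    by_cases hb : (b == a) = true
    · rw [if_pos hb, if_pos hb]; exact ih b m (c + 1)
    · rw [if_neg hb, if_neg hb, ih b (max m c) 1]; omega

theorem pvBridge (l : List String) (d : Nat) : ∀ (k : Int) (s : Int × Int), 1 ≤ k →
    k ≤ (l.length : Int) → (l.length - k.toNat = d) →
    (PySem.List.pyRange k (l.length : Int)).foldl (fun (s : Int × Int) j =>
        if PySem.List.pyGetD l j "" == PySem.List.pyGetD l (j - 1) ""
        then (s.1, s.2 + 1) else (max s.1 s.2, 1)) s
      = pvFoldPairs (l.getD (k - 1).toNat "") (l.drop k.toNat) s := by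
  induction d with
  | zero =>
    intro k s hk1 hkl hd
    have hlen : (l.length : Int) ≤ k := by omega
    rw [PySem.List.pyRange_one_eq_nil hlen, List.foldl_nil,
      List.drop_of_length_le (by omega), pvFoldPairs]
  | succ d ih =>
    intro k s hk1 hkl hd
    have hkN : (k.toNat : Int) = k := Int.toNat_of_nonneg (by omega)
    have hklt : k < (l.length : Int) := by omega
    have hkNlt : k.toNat < l.length := by omega
    rw [PySem.List.pyRange_one_cons hklt, List.foldl_cons,
      PySem.List.pyGetD_eq_getElem l "" (by omega) hklt,
      PySem.List.pyGetD_eq_getElem l "" (by omega : (0:Int) ≤ k - 1) (by omega),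
      List.drop_eq_getElem_cons hkNlt, pvFoldPairs,
      List.getD_eq_getElem l "" (show (k - 1).toNat < l.length by omega),
      ih (k + 1) _ (by omega) (by omega) (by omega)]
    have e1 : (k + 1 - 1).toNat = k.toNat := by omega
    have e2 : (k + 1).toNat = k.toNat + 1 := by omega
    rw [e1, e2, List.getD_eq_getElem l "" hkNlt]

-- A's inner counter loop on a line of length exactly n computes max m (longest run)
theorem pvScan (l : List String) (n m : Int) (h2 : 2 ≤ n) (hl : (l.length : Int) = n) :
    (let p := (PySem.List.pyRange 1 n).foldl (fun (s : Int × Int) j =>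
        if PySem.List.pyGetD l j "" == PySem.List.pyGetD l (j - 1) ""
        then (s.1, s.2 + 1) else (max s.1 s.2, 1)) (m, 1)
     max p.1 p.2) = max m (pvLongestRun l) := by
  cases l with
  | nil => simp at hl; omega
  | cons a rest =>
    show max _ _ = _
    rw [show n = ((a :: rest).length : Int) from hl.symm,
      pvBridge (a :: rest) ((a :: rest).length - 1) 1 (m, 1) (by omega)
        (by omega) (by omega)]
    simpa [pvFoldPairs_max] using congrArg (max m) (pvRunMax_longestRun a rest)

-- ===== B-side: the boundary/gap computation equals the longest run =====

-- bridge: the filtered index range equals the structural cut list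
theorem pvCutsBridge (l : List String) (d : Nat) : ∀ (k : Int), 1 ≤ k →
    k ≤ (l.length : Int) → (l.length - k.toNat = d) →
    (PySem.List.pyRange k (l.length : Int)).filter
        (fun j => !(PySem.List.pyGetD l j "" == PySem.List.pyGetD l (j - 1) ""))
      = pvCutsRef (l.getD (k - 1).toNat "") (l.drop k.toNat) k := by
  induction d with
  | zero =>
    intro k hk1 hkl hd
    have hlen : (l.length : Int) ≤ k := by omega
    rw [PySem.List.pyRange_one_eq_nil hlen, List.filter_nil,
      List.drop_of_length_le (by omega), pvCutsRef]
  | succ d ih =>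
    intro k hk1 hkl hd
    have hklt : k < (l.length : Int) := by omega
    have hkNlt : k.toNat < l.length := by omega
    rw [PySem.List.pyRange_one_cons hklt, List.filter_cons,
      PySem.List.pyGetD_eq_getElem l "" (by omega) hklt,
      PySem.List.pyGetD_eq_getElem l "" (by omega : (0:Int) ≤ k - 1) (by omega),
      List.drop_eq_getElem_cons hkNlt, pvCutsRef,
      List.getD_eq_getElem l "" (show (k - 1).toNat < l.length by omega),
      ih (k + 1) (by omega) (by omega) (by omega)]
    have e1 : (k + 1 - 1).toNat = k.toNat := by omega
    have e2 : (k + 1).toNat = k.toNat + 1 := by omega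
    rw [e1, e2, List.getD_eq_getElem l "" hkNlt]
    by_cases hb : (l[k.toNat] == l[(k - 1).toNat]) = true
    · simp
    · simp

theorem pvDiffs_cons (x y : Int) (rest : List Int) :
    pvDiffs (x :: y :: rest) = (y - x) :: pvDiffs (y :: rest) := rfl

-- the gaps of the boundary list are exactly the run lengths
theorem pvDiffs_cuts (t : List String) : ∀ (a : String) (base : Int),
    pvDiffs (base :: pvCutsRef a t (base + 1) ++ [base + 1 + (t.length : Int)])
      = (pvRuns (a :: t)).map (fun grp => (grp.length : Int)) := by
  induction t with
  | nil =>
    intro a base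
    simp [pvCutsRef, pvRuns, pvDiffs]
  | cons b t ih =>
    intro a base
    have e12 : base + 1 + 1 = base + 2 := by ring
    have hE : base + 1 + (((b :: t).length : Nat) : Int) = base + 2 + (t.length : Int) := by
      simp only [List.length_cons]; push_cast; omega
    by_cases hb : (b == a) = true
    · have hba : b = a := by simpa using hb
      subst hba
      have hcut : pvCutsRef b (b :: t) (base + 1) = pvCutsRef b t (base + 2) := by
        rw [pvCutsRef, if_pos (by simp), e12]
      have hIH := ih b (base + 1)
      rw [e12] at hIH
      rw [hcut, hE, pvRuns, List.takeWhile_cons_of_pos (by simp),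
        List.dropWhile_cons_of_pos (by simp)]
      rw [pvRuns] at hIH
      cases hcs : pvCutsRef b t (base + 2) with
      | nil =>
        rw [hcs] at hIH
        simp only [List.cons_append, List.nil_append, pvDiffs, List.tail_cons, List.zip_cons_cons,
          List.zip_nil_right, List.map_cons, List.map_nil, List.length_cons,
          List.cons.injEq] at hIH ⊢
        obtain ⟨h1, h2⟩ := hIH
        refine ⟨by push_cast at h1 ⊢; omega, h2⟩
      | cons c cs =>
        rw [hcs] at hIH
        simp only [List.cons_append, pvDiffs, List.tail_cons, List.zip_cons_cons,
          List.map_cons, List.length_cons, List.cons.injEq] at hIH ⊢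
        obtain ⟨h1, h2⟩ := hIH
        refine ⟨by push_cast at h1 ⊢; omega, h2⟩
    · have hcut : pvCutsRef a (b :: t) (base + 1)
          = (base + 1) :: pvCutsRef b t (base + 2) := by
        rw [pvCutsRef, if_neg hb, e12]
      have hIH := ih b (base + 1)
      rw [e12] at hIH
      rw [List.cons_append] at hIH
      rw [hcut, hE, List.cons_append, List.cons_append, pvDiffs_cons, hIH]
      conv_rhs => rw [pvRuns]
      rw [List.takeWhile_cons_of_neg (by simpa using hb),
        List.dropWhile_cons_of_neg (by simpa using hb)]
      simp

-- max over a nonempty nonneg-headed list as running max equals foldr max 0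
theorem pvFoldlFoldr (t : List Int) : ∀ (x : Int), 0 ≤ x →
    t.foldl max x = max x (t.foldr max 0) := by
  induction t with
  | nil => intro x hx; simp; omega
  | cons y t ih =>
    intro x hx
    rw [List.foldl_cons, ih (max x y) (by omega), List.foldr_cons]
    omega

theorem pvGap_eq (l : List String) : pvGap l = pvLongestRun l := by
  cases l with
  | nil =>
    simp [pvGap, pvLongestRun, pvRuns,
      PySem.List.pyRange_one_eq_nil (by norm_num : (0:Int) ≤ 1), PySem.List.max?_id_cons]
  | cons a t =>
    have hcuts : (PySem.List.pyRange 1 ((a :: t).length : Int)).filter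
        (fun j => !(PySem.List.pyGetD (a :: t) j "" == PySem.List.pyGetD (a :: t) (j - 1) ""))
        = pvCutsRef a t 1 := by
      rcases t with _ | ⟨b, t'⟩
      · rw [show (([a] : List String).length : Int) = 1 by simp,
          PySem.List.pyRange_one_eq_nil (by omega), List.filter_nil, pvCutsRef]
      · have := pvCutsBridge (a :: b :: t') ((a :: b :: t').length - 1) 1 (by omega)
          (by simp; omega) (by simp)
        simpa using this
    have hlen : (0 : Int) + 1 + (t.length : Int) = ((a :: t).length : Int) := by simp; omega
    have hdiff := pvDiffs_cuts t a 0
    rw [hlen] at hdiff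
    show ((PySem.List.max? (pvDiffs (0 :: (PySem.List.pyRange 1 ((a :: t).length : Int)).filter
          (fun j => !(PySem.List.pyGetD (a :: t) j "" == PySem.List.pyGetD (a :: t) (j - 1) ""))
        ++ [((a :: t).length : Int)])) (fun x => x)).getD 0) = pvLongestRun (a :: t)
    rw [hcuts]
    have h01 : pvCutsRef a t 1 = pvCutsRef a t (0 + 1) := by norm_num
    rw [h01, hdiff, pvRuns]
    rw [List.map_cons, PySem.List.max?_id_cons, Option.getD_some,
      pvFoldlFoldr _ _ (Int.natCast_nonneg _)]
    rw [pvLongestRun, pvRuns, List.map_cons, List.foldr_cons]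

theorem pvGap_fun_eq : pvGap = pvLongestRun := funext pvGap_eq

theorem pvFoldlMax_left (l : List Int) : ∀ (a b : Int),
    l.foldl max (max a b) = max (l.foldl max a) b := by
  induction l with
  | nil => intro a b; rfl
  | cons x l ih =>
    intro a b
    show l.foldl max (max (max a b) x) = max (l.foldl max (max a x)) b
    rw [show max (max a b) x = max (max a x) b by omega, ih]

theorem pvInterleave (R C : Nat → Int) (ran : List Nat) : ∀ (m : Int),
    ran.foldl (fun m i => max (max m (R i)) (C i)) m
      = ((ran.map R ++ ran.map C).foldl max m) := by
  induction ran with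
  | nil => intro m; rfl
  | cons a ran ih =>
    intro m
    show ran.foldl _ (max (max m (R a)) (C a)) = _
    rw [ih, List.map_cons, List.map_cons, List.cons_append, List.foldl_cons,
      List.foldl_append, List.foldl_append, List.foldl_cons,
      show max (max m (R a)) (C a) = max (max m (R a)) (C a) from rfl,
      pvFoldlMax_left (ran.map R) (max m (R a)) (C a), pvFoldlMax_left]

theorem pvIdx_lt {L : Nat} {i : Int} {k : Nat} (h : PySem.List.pyIdx? L i = some k) :
    k < L := by
  unfold PySem.List.pyIdx? at h
  split_ifs at h <;> simp_all <;> omega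

theorem pvGetD_idx {α : Type} (xs : List α) (i : Int) (d : α) {k : Nat}
    (h : PySem.List.pyIdx? xs.length i = some k) :
    PySem.List.pyGetD xs i d = xs.getD k d := by
  simp [PySem.List.pyGetD, PySem.List.pyGet?, h, List.getD_eq_getElem?_getD]

-- setting a cell inside a row preserves every row length
theorem pvRowLen (xs : List (List String)) (i y : Int) (v : String) (j : Nat) :
    ((PySem.List.pySetD xs i
        (PySem.List.pySetD (PySem.List.pyGetD xs i []) y v)).getD j []).length
      = (xs.getD j []).length := by
  cases h : PySem.List.pyIdx? xs.length i with
  | none => simp [PySem.List.pySetD, PySem.List.pySet?, h]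
  | some k =>
    have hk : k < xs.length := pvIdx_lt h
    rw [pvGetD_idx xs i [] h]
    simp only [PySem.List.pySetD, PySem.List.pySet?, h, Option.map_some, Option.getD_some]
    rw [List.getD_eq_getElem?_getD, List.getD_eq_getElem?_getD, List.getElem?_set]
    by_cases hjk : k = j
    · subst hjk
      cases hy : PySem.List.pyIdx? xs[k].length y <;> simp [hk, hy, List.getD_eq_getElem?_getD]
    · simp [hjk]

theorem pvSwapLen (mc : List (List String)) (x1 y1 x2 y2 : Int) :
    (pvSwap mc x1 y1 x2 y2).length = mc.length := by
  simp [pvSwap, PySem.List.length_pySetD]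

theorem pvSwapRowLen (mc : List (List String)) (x1 y1 x2 y2 : Int) (j : Nat) :
    ((pvSwap mc x1 y1 x2 y2).getD j []).length = (mc.getD j []).length := by
  unfold pvSwap
  rw [pvRowLen, pvRowLen]

theorem pvGetD_take (xs : List String) (N : Nat) (j : Int) (d : String)
    (h0 : 0 ≤ j) (hjN : j < (N : Int)) (hjl : j < (xs.length : Int)) :
    PySem.List.pyGetD (xs.take N) j d = PySem.List.pyGetD xs j d := by
  rw [PySem.List.pyGetD_eq_getElem _ d h0 (by simp; omega),
    PySem.List.pyGetD_eq_getElem _ d h0 hjl]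
  exact List.getElem_take

theorem pvGetD_nat_take (xs : List String) (N i : Nat) (d : String)
    (hiN : i < N) (hil : i < xs.length) :
    (xs.take N).getD i d = xs.getD i d := by
  rw [List.getD_eq_getElem _ _ (by simp; omega), List.getD_eq_getElem _ _ hil]
  exact List.getElem_take

theorem pvFoldlMinConst (N : Nat) (ls : List (List String)) (h : ∀ l ∈ ls, l.length = N) :
    ls.foldl (fun a l => min a l.length) N = N := by
  induction ls with
  | nil => rfl
  | cons r rs ih =>
    rw [List.foldl_cons, h r (List.mem_cons_self), min_self]
    exact ih (fun l hl => h l (List.mem_cons_of_mem _ hl))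

theorem pvZipStar_rect (N : Nat) (f : Nat → List String) (hN : 0 < N)
    (hf : ∀ i < N, (f i).length = N) :
    pvZipStar ((List.range N).map f)
      = (List.range N).map (fun i => (List.range N).map (fun j => (f j).getD i "")) := by
  obtain ⟨M, rfl⟩ : ∃ M, N = M + 1 := ⟨N - 1, by omega⟩
  rw [List.range_succ_eq_map, List.map_cons, pvZipStar]
  have hmin : ((List.range M).map (f ∘ Nat.succ)).foldl (fun a l => min a l.length)
      (f 0).length = M + 1 := by
    rw [hf 0 (by omega)]
    exact pvFoldlMinConst _ _ (by
      intro l hl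
      obtain ⟨j, hj, rfl⟩ := List.mem_map.mp hl
      exact hf _ (by simp at hj; omega))
  rw [List.map_map, hmin, show (0 :: List.map Nat.succ (List.range M)) = List.range (M + 1)
    from (List.range_succ_eq_map).symm]
  apply List.map_congr_left
  intro i hi
  simp [List.range_succ_eq_map, Function.comp_def]

theorem pvRowScan (g : List (List String)) (N k : Nat) (acc : Int) (h2 : 2 ≤ (N : Int))
    (hk : k < N) (hrows : ∀ j < N, (N : Int) ≤ ((g.getD j []).length : Int)) :
    max (((PySem.List.pyRange 1 (N : Int)).foldl (fun (s : Int × Int) j =>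
        if PySem.List.pyGetD (PySem.List.pyGetD g (k : Int) []) j "" ==
           PySem.List.pyGetD (PySem.List.pyGetD g (k : Int) []) (j - 1) ""
        then (s.1, s.2 + 1) else (max s.1 s.2, 1)) (acc, 1)).1)
      (((PySem.List.pyRange 1 (N : Int)).foldl (fun (s : Int × Int) j =>
        if PySem.List.pyGetD (PySem.List.pyGetD g (k : Int) []) j "" ==
           PySem.List.pyGetD (PySem.List.pyGetD g (k : Int) []) (j - 1) ""
        then (s.1, s.2 + 1) else (max s.1 s.2, 1)) (acc, 1)).2)
      = max acc (pvLongestRun ((g.getD k []).take N)) := by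
  have hrk := hrows k hk
  have hl : ((((g.getD k []).take N).length : Nat) : Int) = (N : Int) := by
    simp only [List.length_take]; omega
  have hcongr := PySem.List.foldl_congr_mem (PySem.List.pyRange 1 (N : Int))
    (fun (s : Int × Int) j =>
        if PySem.List.pyGetD (PySem.List.pyGetD g (k : Int) []) j "" ==
           PySem.List.pyGetD (PySem.List.pyGetD g (k : Int) []) (j - 1) ""
        then (s.1, s.2 + 1) else (max s.1 s.2, 1))
    (fun (s : Int × Int) j =>
        if PySem.List.pyGetD ((g.getD k []).take N) j "" ==
           PySem.List.pyGetD ((g.getD k []).take N) (j - 1) ""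
        then (s.1, s.2 + 1) else (max s.1 s.2, 1)) (acc, 1) ?_
  · rw [hcongr]
    exact pvScan ((g.getD k []).take N) (N : Int) acc h2 hl
  · intro s j hj
    obtain ⟨hj1, hj2⟩ := PySem.List.mem_pyRange_one.mp hj
    beta_reduce
    rw [PySem.List.pyGetD_natCast,
      pvGetD_take (g.getD k []) N j "" (by omega) hj2 (by omega),
      pvGetD_take (g.getD k []) N (j - 1) "" (by omega) (by omega) (by omega)]

theorem pvColScan (g : List (List String)) (N k : Nat) (acc : Int) (h2 : 2 ≤ (N : Int))
    (hk : k < N) (hlen : N ≤ g.length)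
    (hrows : ∀ j < N, (N : Int) ≤ ((g.getD j []).length : Int)) :
    max (((PySem.List.pyRange 1 (N : Int)).foldl (fun (s : Int × Int) j =>
        if PySem.List.pyGetD (PySem.List.pyGetD g j []) (k : Int) "" ==
           PySem.List.pyGetD (PySem.List.pyGetD g (j - 1) []) (k : Int) ""
        then (s.1, s.2 + 1) else (max s.1 s.2, 1)) (acc, 1)).1)
      (((PySem.List.pyRange 1 (N : Int)).foldl (fun (s : Int × Int) j =>
        if PySem.List.pyGetD (PySem.List.pyGetD g j []) (k : Int) "" ==
           PySem.List.pyGetD (PySem.List.pyGetD g (j - 1) []) (k : Int) ""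
        then (s.1, s.2 + 1) else (max s.1 s.2, 1)) (acc, 1)).2)
      = max acc (pvLongestRun ((List.range N).map
          (fun j => ((g.getD j []).take N).getD k ""))) := by
  have hl : ((((List.range N).map
      (fun j => ((g.getD j []).take N).getD k "")).length : Nat) : Int) = (N : Int) := by simp
  have hacc : ∀ (j : Int), 0 ≤ j → j < (N : Int) →
      PySem.List.pyGetD (PySem.List.pyGetD g j []) (k : Int) ""
        = PySem.List.pyGetD ((List.range N).map
            (fun j => ((g.getD j []).take N).getD k "")) j "" := by
    intro j hj0 hjN
    have hjl : j < (g.length : Int) := by omega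
    have hjn : j.toNat < N := by omega
    rw [PySem.List.pyGetD_eq_getElem g [] hj0 hjl, PySem.List.pyGetD_natCast,
      PySem.List.pyGetD_eq_getElem _ "" hj0 (by simp; omega)]
    rw [List.getElem_map, List.getElem_range,
      pvGetD_nat_take _ N k "" hk (by have := hrows j.toNat hjn; omega),
      List.getD_eq_getElem g [] (by omega)]
  have hcongr := PySem.List.foldl_congr_mem (PySem.List.pyRange 1 (N : Int))
    (fun (s : Int × Int) j =>
        if PySem.List.pyGetD (PySem.List.pyGetD g j []) (k : Int) "" ==
           PySem.List.pyGetD (PySem.List.pyGetD g (j - 1) []) (k : Int) ""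
        then (s.1, s.2 + 1) else (max s.1 s.2, 1))
    (fun (s : Int × Int) j =>
        if PySem.List.pyGetD ((List.range N).map
             (fun j => ((g.getD j []).take N).getD k "")) j "" ==
           PySem.List.pyGetD ((List.range N).map
             (fun j => ((g.getD j []).take N).getD k "")) (j - 1) ""
        then (s.1, s.2 + 1) else (max s.1 s.2, 1)) (acc, 1) ?_
  · rw [hcongr]
    exact pvScan _ (N : Int) acc h2 hl
  · intro s j hj
    obtain ⟨hj1, hj2⟩ := PySem.List.mem_pyRange_one.mp hj
    beta_reduce
    rw [hacc j (by omega) hj2, hacc (j - 1) (by omega) (by omega)]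

-- ===== VERDICT (by name: the statement is the Claim_ definition above) =====
theorem countCandies_spec : Claim_equal_countCandies := by
  intro mc n x1 y1 x2 y2 _hdom hpre
  obtain ⟨hx1, hy1, hx2, hy2, hgrid⟩ := hpre
  unfold Spec_countCandies
  rcases (show n ≤ 0 ∨ n = 1 ∨ 2 ≤ n by omega) with hn | hn | hn
  · simp only [countCandies, countCandies_alt, pvGap_fun_eq, PySem.List.pyRange_one_eq_nil hn]
    simp [pvZipStar]
  · subst hn
    have h01 : PySem.List.pyRange 0 (1 : Int) = [(0 : Int)] := by
      rw [PySem.List.pyRange_one_cons (by omega), PySem.List.pyRange_one_eq_nil (by omega)]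
    have h11 : PySem.List.pyRange 1 (1 : Int) = [] := PySem.List.pyRange_one_eq_nil (by omega)
    simp only [countCandies, countCandies_alt, pvGap_fun_eq, h01, h11, List.foldl_nil,
      List.foldl_cons, List.map_cons, List.map_nil]
    rcases hrow : (pvSwap mc x1 y1 x2 y2)[0]?.getD ([] : List String) with _ | ⟨a, t⟩ <;>
      simp [PySem.List.pyGetD_zero, PySem.List.slice_to _ (by omega : (0:Int) ≤ 1), hrow,
        pvZipStar, pvRuns, pvLongestRun]
  · obtain ⟨N, rfl⟩ : ∃ N : Nat, n = (N : Int) := ⟨n.toNat, by omega⟩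
    obtain ⟨hNlen, hrows0⟩ := hgrid hn
    simp only [countCandies, countCandies_alt, pvGap_fun_eq]
    have hglen : (pvSwap mc x1 y1 x2 y2).length = mc.length := pvSwapLen mc x1 y1 x2 y2
    set g := pvSwap mc x1 y1 x2 y2 with hgdef
    have hrows : ∀ j, j < N → (N : Int) ≤ ((g.getD j []).length : Int) := by
      intro j hj
      rw [hgdef, pvSwapRowLen]
      have hjl : j < mc.length := by omega
      have hlt : j < (mc.take N).length := by simp; omega
      have hmem : mc.getD j [] ∈ mc.take ((N : Int)).toNat := by
        rw [Int.toNat_natCast, List.getD_eq_getElem mc [] hjl]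
        have hte : (mc.take N)[j]'hlt = mc[j]'hjl := List.getElem_take
        rw [← hte]
        exact List.getElem_mem hlt
      exact hrows0 _ hmem
    rw [PySem.List.pyRange_zero_natCast]
    simp only [List.foldl_map]
    have hstep := PySem.List.foldl_congr_mem (List.range N)
      (fun (acc : Int) (k : Nat) =>
        max (((PySem.List.pyRange 1 (N : Int)).foldl (fun (s : Int × Int) j =>
          if PySem.List.pyGetD (PySem.List.pyGetD g j []) (k : Int) "" ==
             PySem.List.pyGetD (PySem.List.pyGetD g (j - 1) []) (k : Int) ""
          then (s.1, s.2 + 1) else (max s.1 s.2, 1))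
          (max (((PySem.List.pyRange 1 (N : Int)).foldl (fun (s : Int × Int) j =>
            if PySem.List.pyGetD (PySem.List.pyGetD g (k : Int) []) j "" ==
               PySem.List.pyGetD (PySem.List.pyGetD g (k : Int) []) (j - 1) ""
            then (s.1, s.2 + 1) else (max s.1 s.2, 1)) (acc, 1)).1)
            (((PySem.List.pyRange 1 (N : Int)).foldl (fun (s : Int × Int) j =>
            if PySem.List.pyGetD (PySem.List.pyGetD g (k : Int) []) j "" ==
               PySem.List.pyGetD (PySem.List.pyGetD g (k : Int) []) (j - 1) ""
            then (s.1, s.2 + 1) else (max s.1 s.2, 1)) (acc, 1)).2), 1)).1)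
        (((PySem.List.pyRange 1 (N : Int)).foldl (fun (s : Int × Int) j =>
          if PySem.List.pyGetD (PySem.List.pyGetD g j []) (k : Int) "" ==
             PySem.List.pyGetD (PySem.List.pyGetD g (j - 1) []) (k : Int) ""
          then (s.1, s.2 + 1) else (max s.1 s.2, 1))
          (max (((PySem.List.pyRange 1 (N : Int)).foldl (fun (s : Int × Int) j =>
            if PySem.List.pyGetD (PySem.List.pyGetD g (k : Int) []) j "" ==
               PySem.List.pyGetD (PySem.List.pyGetD g (k : Int) []) (j - 1) ""
            then (s.1, s.2 + 1) else (max s.1 s.2, 1)) (acc, 1)).1)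
            (((PySem.List.pyRange 1 (N : Int)).foldl (fun (s : Int × Int) j =>
            if PySem.List.pyGetD (PySem.List.pyGetD g (k : Int) []) j "" ==
               PySem.List.pyGetD (PySem.List.pyGetD g (k : Int) []) (j - 1) ""
            then (s.1, s.2 + 1) else (max s.1 s.2, 1)) (acc, 1)).2), 1)).2))
      (fun (m : Int) (k : Nat) =>
        max (max m (pvLongestRun ((g.getD k []).take N)))
          (pvLongestRun ((List.range N).map
            (fun j => ((g.getD j []).take N).getD k "")))) 1 ?_
    · rw [hstep, pvInterleave (fun k => pvLongestRun ((g.getD k []).take N))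
        (fun k => pvLongestRun ((List.range N).map
          (fun j => ((g.getD j []).take N).getD k ""))) (List.range N) 1]
      have hsub : (List.range N).map
          ((fun i => PySem.List.slice (PySem.List.pyGetD g i []) none (some (N : Int))) ∘
            (fun k : Nat => (k : Int)))
          = (List.range N).map (fun k => (g.getD k []).take N) := by
        apply List.map_congr_left
        intro k _
        simp only [Function.comp_apply, PySem.List.pyGetD_natCast,
          PySem.List.slice_to _ (Int.natCast_nonneg N), Int.toNat_natCast]
      rw [List.map_map, hsub, pvZipStar_rect N _ (by omega)
        (by intro i hi; simp only [List.length_take]; have := hrows i hi; omega)]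
      simp [List.foldl_append, List.foldl_map]
    · intro acc k hk
      have hkN : k < N := List.mem_range.mp hk
      beta_reduce
      rw [pvRowScan g N k acc hn hkN hrows,
        pvColScan g N k (max acc (pvLongestRun ((g.getD k []).take N))) hn hkN
          (by omega) hrows]
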